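-- pv_equiv track=rewrite | github.com/pypi-data/pypi-mirror-404 | packages/deepresearch-flow/deepresearch_flow-0.6.1.tar.gz/deepresearch_flow-0.6.1/python/deepresearch_flow/paper/web/filters.py | presence_filter
-- ===== SOURCE A (Python) =====
-- BOOL_TRUE = {"1", "true", "yes", "with", "has"}
--
-- BOOL_FALSE = {"0", "false", "no", "without"}
--
-- def normalize_presence_value(value: str) -> str | None:
--     """Normalize a presence filter value to 'with' or 'without'."""
--     token = value.strip().lower()
--     if token in BOOL_TRUE:
--         return "with"
--     if token in BOOL_FALSE:
--         return "without"
--     return None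
--
-- def presence_filter(values: list[str]) -> set[str] | None:
--     """Convert a list of presence filter values to a normalized set."""
--     normalized = set()
--     for value in values:
--         token = normalize_presence_value(value)
--         if token:
--             normalized.add(token)
--     if not normalized or normalized == {"with", "without"}:
--         return None
--     return normalized
-- ===== SOURCE B (Python) =====
-- BOOL_TRUE = {"1", "true", "yes", "with", "has"}
--
-- BOOL_FALSE = {"0", "false", "no", "without"}
--
--
-- def presence_filter(values):
--     """Convert a list of presence filter values to a normalized set."""
--     tokens = {v.strip().lower() for v in values}
--     has_with = not tokens.isdisjoint(BOOL_TRUE)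
--     has_without = not tokens.isdisjoint(BOOL_FALSE)
--     if has_with != has_without:
--         return {"with"} if has_with else {"without"}
--     return None
-- ===== Notes on version B (the rewrite author's own statement) =====
-- stated objective: idiomatic
-- what changed: Replaces the per-value normalize-and-accumulate loop with bulk set algebra: build the set of stripped/lowered tokens once, derive two flags via set.isdisjoint against BOOL_TRUE/BOOL_FALSE, and return by a flag comparison instead of inspecting an accumulated set.
import Mathlib
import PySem

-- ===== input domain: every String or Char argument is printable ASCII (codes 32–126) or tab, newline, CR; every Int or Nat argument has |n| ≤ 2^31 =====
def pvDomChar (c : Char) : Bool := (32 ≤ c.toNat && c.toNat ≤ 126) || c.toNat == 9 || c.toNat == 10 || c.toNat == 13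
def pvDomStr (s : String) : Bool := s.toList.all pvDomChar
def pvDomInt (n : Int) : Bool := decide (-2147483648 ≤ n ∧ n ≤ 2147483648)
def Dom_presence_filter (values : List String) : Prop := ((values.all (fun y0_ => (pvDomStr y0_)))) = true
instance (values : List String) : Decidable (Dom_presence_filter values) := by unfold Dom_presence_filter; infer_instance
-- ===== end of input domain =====

-- B replaces A's per-value normalize-and-accumulate loop by bulk set algebra
-- (token set built once, two isdisjoint flags, return decided by comparing the flags): idiomatic, same cost.


-- ===== PORT A =====
-- module constants BOOL_TRUE / BOOL_FALSE (shared by both Pythons)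
def pvBoolTrue : PySem.Set String := PySem.Set.ofList ["1", "true", "yes", "with", "has"]
def pvBoolFalse : PySem.Set String := PySem.Set.ofList ["0", "false", "no", "without"]

def normalize_presence_value (value : String) : Option String :=
  let token := PySem.Str.lower (PySem.Str.strip value)
  if PySem.Set.contains pvBoolTrue token then some "with"
  else if PySem.Set.contains pvBoolFalse token then some "without"
  else none

-- 'if token:' — normalize_presence_value returns only "with"/"without" (never ""), so truthiness = isSome
def presence_filter (values : List String) : Option (List String) :=
  let normalized : PySem.Set String :=
    values.foldl (fun s v =>
      (normalize_presence_value v).elim s (fun t => PySem.Set.add s t)) PySem.Set.empty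
  if normalized.isEmpty || PySem.Set.equal normalized (PySem.Set.ofList ["with", "without"]) then
    none
  else
    some normalized

-- ===== PORT B =====
def presence_filter_alt (values : List String) : Option (List String) :=
  let tokens : PySem.Set String :=
    PySem.Set.ofList (values.map (fun v => PySem.Str.lower (PySem.Str.strip v)))
  let hasWith : Bool := !(PySem.Set.isdisjoint tokens pvBoolTrue)
  let hasWithout : Bool := !(PySem.Set.isdisjoint tokens pvBoolFalse)
  if hasWith ≠ hasWithout then
    if hasWith then some ["with"] else some ["without"]
  else
    none

-- ===== PRECONDITION & SPEC =====
def Spec_presence_filter (values : List String) (out : Option (List String)) : Prop := out = presence_filter_alt values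
instance (values : List String) (out : Option (List String)) : Decidable (Spec_presence_filter values out) := by unfold Spec_presence_filter; infer_instance

-- ===== CLAIM (what is proved, stated in full; the proofs are below) =====
def Claim_equal_presence_filter : Prop := ∀ (values : List String), Dom_presence_filter values → Spec_presence_filter values (presence_filter values)

-- ===== LEMMAS AND PROOFS =====

-- the token both Pythons compute per value
def pvTok (v : String) : String := PySem.Str.lower (PySem.Str.strip v)

-- BOOL_TRUE and BOOL_FALSE are disjoint
lemma pv_disjoint (t : String) (h : t ∈ pvBoolTrue) : t ∉ pvBoolFalse := by
  simp only [pvBoolTrue, PySem.Set.mem_ofList] at h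
  simp only [List.mem_cons, List.not_mem_nil, or_false] at h
  rcases h with h | h | h | h | h <;> subst h <;> decide

-- A's loop step, by cases on the normalizer
lemma pv_step (s : PySem.Set String) (v : String) :
    ((normalize_presence_value v).elim s (fun t => PySem.Set.add s t)) =
    (if pvBoolTrue.contains (pvTok v) then PySem.Set.add s "with"
     else if pvBoolFalse.contains (pvTok v) then PySem.Set.add s "without"
     else s) := by
  unfold normalize_presence_value pvTok
  by_cases h1 : PySem.Str.lower (PySem.Str.strip v) ∈ pvBoolTrue <;>
    by_cases h2 : PySem.Str.lower (PySem.Str.strip v) ∈ pvBoolFalse <;>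
    simp [h1, h2]

-- characterization of A's accumulated set
lemma pv_loop (values : List String) (s : PySem.Set String)
    (hnd : s.Nodup) (hsub : ∀ x ∈ s, x = "with" ∨ x = "without") :
    (values.foldl (fun s v =>
      (normalize_presence_value v).elim s (fun t => PySem.Set.add s t)) s).Nodup ∧
    (∀ x ∈ values.foldl (fun s v =>
      (normalize_presence_value v).elim s (fun t => PySem.Set.add s t)) s, x = "with" ∨ x = "without") ∧
    ("with" ∈ values.foldl (fun s v =>
      (normalize_presence_value v).elim s (fun t => PySem.Set.add s t)) s ↔ "with" ∈ s ∨ ∃ v ∈ values, pvTok v ∈ pvBoolTrue) ∧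
    ("without" ∈ values.foldl (fun s v =>
      (normalize_presence_value v).elim s (fun t => PySem.Set.add s t)) s ↔ "without" ∈ s ∨ ∃ v ∈ values, pvTok v ∈ pvBoolFalse) := by
  induction values generalizing s with
  | nil => simpa using ⟨hnd, hsub⟩
  | cons v vs ih =>
    simp only [List.foldl_cons]
    rw [pv_step s v]
    by_cases h1 : pvTok v ∈ pvBoolTrue
    · have hd := pv_disjoint _ h1
      rw [if_pos ((PySem.Set.contains_iff _ _).2 h1)]
      obtain ⟨a1, a2, a3, a4⟩ := ih (PySem.Set.add s "with")
        (PySem.Set.nodup_add s "with" hnd)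
        (by intro x hx
            rcases (PySem.Set.mem_add s "with" x).1 hx with h | h
            · exact hsub x h
            · exact Or.inl h)
      refine ⟨a1, a2, ?_, ?_⟩
      · rw [a3, PySem.Set.mem_add]
        constructor
        · rintro (⟨h | h⟩ | h)
          · exact Or.inl h
          · exact Or.inr ⟨v, by simp, h1⟩
          · exact Or.inr (by rcases h with ⟨w, hw, hw2⟩; exact ⟨w, by simp [hw], hw2⟩)
        · rintro (h | ⟨w, hw, hw2⟩)
          · exact Or.inl (Or.inl h)
          · rcases List.mem_cons.1 hw with h | h
            · exact Or.inl (Or.inr rfl)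
            · exact Or.inr ⟨w, h, hw2⟩
      · rw [a4, PySem.Set.mem_add]
        constructor
        · rintro (⟨h | h⟩ | h)
          · exact Or.inl h
          · exact absurd h (by decide)
          · exact Or.inr (by rcases h with ⟨w, hw, hw2⟩; exact ⟨w, by simp [hw], hw2⟩)
        · rintro (h | ⟨w, hw, hw2⟩)
          · exact Or.inl (Or.inl h)
          · rcases List.mem_cons.1 hw with h | h
            · exact absurd (h ▸ hw2) hd
            · exact Or.inr ⟨w, h, hw2⟩
    · rw [if_neg (fun hh => h1 ((PySem.Set.contains_iff _ _).1 hh))]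
      by_cases h2 : pvTok v ∈ pvBoolFalse
      · rw [if_pos ((PySem.Set.contains_iff _ _).2 h2)]
        obtain ⟨a1, a2, a3, a4⟩ := ih (PySem.Set.add s "without")
          (PySem.Set.nodup_add s "without" hnd)
          (by intro x hx
              rcases (PySem.Set.mem_add s "without" x).1 hx with h | h
              · exact hsub x h
              · exact Or.inr h)
        refine ⟨a1, a2, ?_, ?_⟩
        · rw [a3, PySem.Set.mem_add]
          constructor
          · rintro (⟨h | h⟩ | h)
            · exact Or.inl h
            · exact absurd h (by decide)
            · exact Or.inr (by rcases h with ⟨w, hw, hw2⟩; exact ⟨w, by simp [hw], hw2⟩)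
          · rintro (h | ⟨w, hw, hw2⟩)
            · exact Or.inl (Or.inl h)
            · rcases List.mem_cons.1 hw with h | h
              · exact absurd (h ▸ hw2) h1
              · exact Or.inr ⟨w, h, hw2⟩
        · rw [a4, PySem.Set.mem_add]
          constructor
          · rintro (⟨h | h⟩ | h)
            · exact Or.inl h
            · exact Or.inr ⟨v, by simp, h2⟩
            · exact Or.inr (by rcases h with ⟨w, hw, hw2⟩; exact ⟨w, by simp [hw], hw2⟩)
          · rintro (h | ⟨w, hw, hw2⟩)
            · exact Or.inl (Or.inl h)
            · rcases List.mem_cons.1 hw with h | h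
              · exact Or.inl (Or.inr rfl)
              · exact Or.inr ⟨w, h, hw2⟩
      · rw [if_neg (fun hh => h2 ((PySem.Set.contains_iff _ _).1 hh))]
        obtain ⟨a1, a2, a3, a4⟩ := ih s hnd hsub
        refine ⟨a1, a2, ?_, ?_⟩
        · rw [a3]
          constructor
          · rintro (h | h)
            · exact Or.inl h
            · exact Or.inr (by rcases h with ⟨w, hw, hw2⟩; exact ⟨w, by simp [hw], hw2⟩)
          · rintro (h | ⟨w, hw, hw2⟩)
            · exact Or.inl h
            · rcases List.mem_cons.1 hw with h | h
              · exact absurd (h ▸ hw2) h1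
              · exact Or.inr ⟨w, h, hw2⟩
        · rw [a4]
          constructor
          · rintro (h | h)
            · exact Or.inl h
            · exact Or.inr (by rcases h with ⟨w, hw, hw2⟩; exact ⟨w, by simp [hw], hw2⟩)
          · rintro (h | ⟨w, hw, hw2⟩)
            · exact Or.inl h
            · rcases List.mem_cons.1 hw with h | h
              · exact absurd (h ▸ hw2) h2
              · exact Or.inr ⟨w, h, hw2⟩
  


lemma pv_eq_singleton (c : String) (n : List String) (hnd : n.Nodup)
    (hall : ∀ x ∈ n, x = c) (hne : n ≠ []) : n = [c] := by
  match n with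
  | [] => exact absurd rfl hne
  | [a] => simp [hall a (by simp)]
  | a :: b :: t =>
    have ha := hall a (by simp)
    have hb := hall b (by simp)
    subst ha
    rw [hb] at hnd
    simp at hnd

-- B's flags, as existential statements
lemma pv_flag (values : List String) (T : PySem.Set String) :
    (!(PySem.Set.isdisjoint (PySem.Set.ofList (values.map pvTok)) T)) = true ↔
    ∃ v ∈ values, pvTok v ∈ T := by
  rw [Bool.not_eq_true', ← Bool.not_eq_true, PySem.Set.isdisjoint_iff]
  push Not
  constructor
  · rintro ⟨x, hx, hT⟩
    rcases List.mem_map.1 ((PySem.Set.mem_ofList (values.map pvTok) x).1 hx) with ⟨w, hw, rfl⟩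
    exact ⟨w, hw, hT⟩
  · rintro ⟨w, hw, hT⟩
    exact ⟨pvTok w, (PySem.Set.mem_ofList (values.map pvTok) (pvTok w)).2
      (List.mem_map_of_mem hw), hT⟩

-- ===== VERDICT (by name: the statement is the Claim_ definition above) =====
theorem presence_filter_spec : Claim_equal_presence_filter := by
  intro values _
  unfold Spec_presence_filter
  simp only [presence_filter, presence_filter_alt]
  have hmap : (fun v : String => PySem.Str.lower (PySem.Str.strip v)) = pvTok := rfl
  rw [hmap]
  simp only [PySem.Set.empty]
  obtain ⟨hnd, hsub, hwith, hwithout⟩ :=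
    pv_loop values ([] : PySem.Set String) List.nodup_nil (by intro x hx; simp at hx)
  simp only [List.not_mem_nil, false_or] at hwith hwithout
  set n := values.foldl (fun s v =>
      (normalize_presence_value v).elim s (fun t => PySem.Set.add s t)) ([] : PySem.Set String) with hn
  by_cases hW : ∃ v ∈ values, pvTok v ∈ pvBoolTrue
  · have hWb := (pv_flag values pvBoolTrue).2 hW
    by_cases hWo : ∃ v ∈ values, pvTok v ∈ pvBoolFalse
    · have hWob := (pv_flag values pvBoolFalse).2 hWo
      have heq : PySem.Set.equal n (PySem.Set.ofList ["with", "without"]) = true := by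
        rw [PySem.Set.equal_iff]
        intro x
        constructor
        · intro hx
          rcases hsub x hx with rfl | rfl <;> decide
        · intro hx
          rcases (PySem.Set.mem_ofList _ x).1 hx with h
          simp only [List.mem_cons, List.not_mem_nil, or_false] at h
          rcases h with rfl | rfl
          · exact hwith.2 hW
          · exact hwithout.2 hWo
      rw [heq, hWb, hWob]
      simp
    · have hWob : (!(PySem.Set.isdisjoint (PySem.Set.ofList (values.map pvTok)) pvBoolFalse)) = false := by
        rw [Bool.eq_false_iff, Ne, pv_flag]; exact hWo
      have hin : "with" ∈ n := hwith.2 hW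
      have hout : "without" ∉ n := fun h => hWo (hwithout.1 h)
      have hsing : n = ["with"] :=
        pv_eq_singleton _ n hnd
          (fun x hx => (hsub x hx).resolve_right (fun h => hout (h ▸ hx)))
          (fun h => by rw [h] at hin; simp at hin)
      rw [hsing, hWb, hWob]
      decide
  · have hWb : (!(PySem.Set.isdisjoint (PySem.Set.ofList (values.map pvTok)) pvBoolTrue)) = false := by
      rw [Bool.eq_false_iff, Ne, pv_flag]; exact hW
    by_cases hWo : ∃ v ∈ values, pvTok v ∈ pvBoolFalse
    · have hWob := (pv_flag values pvBoolFalse).2 hWo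
      have hin : "without" ∈ n := hwithout.2 hWo
      have hout : "with" ∉ n := fun h => hW (hwith.1 h)
      have hsing : n = ["without"] :=
        pv_eq_singleton _ n hnd
          (fun x hx => (hsub x hx).resolve_left (fun h => hout (h ▸ hx)))
          (fun h => by rw [h] at hin; simp at hin)
      rw [hsing, hWb, hWob]
      decide
    · have hWob : (!(PySem.Set.isdisjoint (PySem.Set.ofList (values.map pvTok)) pvBoolFalse)) = false := by
        rw [Bool.eq_false_iff, Ne, pv_flag]; exact hWo
      have hempty : n = [] := by
        cases hcs : n with
        | nil => rfl
        | cons a t =>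
          exfalso
          rcases hsub a (by rw [hcs]; simp) with rfl | rfl
          · exact hW (hwith.1 (by rw [hcs]; simp))
          · exact hWo (hwithout.1 (by rw [hcs]; simp))
      rw [hempty, hWb, hWob]
      decide
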